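-- pv_equiv track=rewrite | github.com/ztxtech/dstz | dst/element/permutation.py | order_code_intersection
-- ===== SOURCE A (Python) =====
-- import itertools
--
-- def order_code_intersection(a, b):
--     """
--     Identifies the intersection of two ordered tuples, maintaining the order of elements as they appear in the first tuple (`a`).
--     For intersecting elements, their respective indices from both tuples are paired and sorted based on their appearance in `a`.
--
--     Args:
--         - a (tuple): The first ordered tuple of elements.
--         - b (tuple): The second ordered tuple of elements.
--
--     Returns:
--         - list of tuples: Each tuple contains two integers representing the index of an intersecting element in tuples `a` and `b`, respectively.
--                           The tuples are ordered by the element's position in `a`.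
--
--     Description:
--         This function creates a mapping of elements to their indices in tuple `a` and updates it to include indices from tuple `b`.
--         It ensures that only elements present in both tuples are considered, and for these elements, it records the maximum index encountered,
--         effectively capturing the last occurrence of the element in both tuples if duplicates exist. The mapping is then transformed
--         to group indices by their corresponding elements and sorted by the element's natural ordering from `a`.
--         Finally, it computes the Cartesian product of the grouped indices, resulting in a list of tuples that represent the intersections.
--     """
--
--     def swap_key_value(input_dict):
--         """
--         Swaps the keys and values of a dictionary where values are hashable and can be lists.
--         If multiple keys map to the same value, the new dictionary will have that value mapped to a list of all corresponding keys.
--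
--         Args:
--             - input_dict (dict): The dictionary to transform, where keys are expected to be unique but values may not be.
--
--         Returns:
--             - dict: A new dictionary with original values as keys and lists of original keys as values.
--                 If a value was unique in the input, its corresponding key is wrapped in a single-element list.
--
--         Description:
--             This function iterates over each key-value pair in the `input_dict`. For each pair, it checks if the value already exists
--             as a key in the `output_dict`. If not, it creates a new entry with the value as the key and the original key wrapped in a list as the value.
--             If the value already exists, it appends the current key to the list of keys associated with that value. This results in a dictionary
--             where values from the input dictionary become keys, and each key maps to a list of keys that were associated with the value in the original dictionary.
--         """
--
--         output_dict = {}
--         for key, value in input_dict.items():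
--             if value not in output_dict:
--                 output_dict[value] = [key]
--             else:
--                 output_dict[value].append(key)
--         return output_dict
--
--     res = {}
--
--     for idx, sample in enumerate(a):
--         if sample not in res:
--             res[sample] = [idx]
--         else:
--             res[sample].append(idx)
--
--     for idx, sample in enumerate(b):
--         if sample not in res:
--             res[sample] = [idx]
--         else:
--             res[sample].append(idx)
--
--     for sample in res.keys():
--         res[sample] = max(res[sample])
--
--     res = swap_key_value(res)
--     res = [res[key] for key in sorted(res.keys())]
--     res = [tuple(order) for order in itertools.product(*res)]
--     return res
-- ===== SOURCE B (Python) =====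
-- import itertools
--
-- def order_code_intersection(a, b):
--     # Running max of each element's raw enumerate index across a then b (one pass,
--     # no index-list accumulation), then one group per distinct max-value in
--     # ascending order, then the cartesian product of the groups.
--     rank = {}
--     for idx, x in enumerate(a):
--         rank[x] = max(rank.get(x, idx), idx)
--     for idx, x in enumerate(b):
--         rank[x] = max(rank.get(x, idx), idx)
--     groups = [[x for x, r in rank.items() if r == v] for v in sorted(set(rank.values()))]
--     return [tuple(g) for g in itertools.product(*groups)]
-- ===== Notes on version B (the rewrite author's own statement) =====
-- stated objective: simpler
-- what changed: B keeps a single running-max-index per element instead of accumulating index lists and max-reducing them, and replaces swap_key_value's dict inversion by filtering the items once per distinct max-value in sorted order before taking the cartesian product.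
import Mathlib
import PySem

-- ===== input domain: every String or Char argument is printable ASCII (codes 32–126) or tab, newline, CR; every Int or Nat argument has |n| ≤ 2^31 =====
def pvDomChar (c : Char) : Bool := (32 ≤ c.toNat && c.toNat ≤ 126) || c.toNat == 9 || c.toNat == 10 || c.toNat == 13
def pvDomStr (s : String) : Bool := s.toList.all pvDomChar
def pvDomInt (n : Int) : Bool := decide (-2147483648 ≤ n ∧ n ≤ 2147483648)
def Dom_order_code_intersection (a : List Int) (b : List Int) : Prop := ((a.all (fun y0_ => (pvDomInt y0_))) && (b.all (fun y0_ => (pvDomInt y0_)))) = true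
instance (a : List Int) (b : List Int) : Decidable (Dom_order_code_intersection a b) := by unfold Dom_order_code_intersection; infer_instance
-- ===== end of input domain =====

-- B replaces A's index-list accumulation + max reduction + dict inversion by a single
-- running-max pass and a per-sorted-value filter (objective: simpler; not faster).

-- itertools.product(*pools) in CPython's documented loop shape; both Pythons call it
def pyProduct (pools : List (List Int)) : List (List Int) :=
  pools.foldl (fun result pool => result.flatMap (fun r => pool.map (fun x => r ++ [x]))) [[]]

-- ===== PORT A =====
-- one iteration of A's "if k not in d: d[k]=[i] else: d[k].append(i)" loop body
-- (the same shape as swap_key_value's loop body)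
def ociCollect (d : PySem.Dict Int (List Int)) (k : Int) (i : Int) : PySem.Dict Int (List Int) :=
  match d.get? k with
  | none => d.insert k [i]
  | some l => d.insert k (l ++ [i])

def order_code_intersection (a : List Int) (b : List Int) : List (List Int) :=
  let res0 := (PySem.List.enumerate a).foldl (fun d p => ociCollect d p.2 p.1) PySem.Dict.empty
  let res1 := (PySem.List.enumerate b).foldl (fun d p => ociCollect d p.2 p.1) res0
  -- Python rebinds res[sample] = max(res[sample]) (value type list → int); ported as a
  -- fresh dict over the same items in order; every value list is nonempty, so max never
  -- raises and the '.getD 0' default is unreachable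
  let resM : PySem.Dict Int Int :=
    res1.items.foldl (fun d p => d.insert p.1 ((PySem.List.max? p.2 (fun x => x)).getD 0))
      PySem.Dict.empty
  let swap := resM.items.foldl (fun o p => ociCollect o p.2 p.1) PySem.Dict.empty
  let groups := (PySem.List.sorted swap.keys (fun x => x) false).map (fun k => swap.getD k [])
  pyProduct groups

-- ===== PORT B =====
def order_code_intersection_alt (a : List Int) (b : List Int) : List (List Int) :=
  let r0 := (PySem.List.enumerate a).foldl
    (fun d p => d.insert p.2 (max (d.getD p.2 p.1) p.1)) PySem.Dict.empty
  let rank := (PySem.List.enumerate b).foldl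
    (fun d p => d.insert p.2 (max (d.getD p.2 p.1) p.1)) r0
  let groups := (PySem.List.sorted (PySem.Set.ofList rank.values) (fun x => x) false).map
    (fun v => (rank.items.filter (fun p => p.2 == v)).map (fun p => p.1))
  pyProduct groups

-- ===== PRECONDITION & SPEC =====
def Spec_order_code_intersection (a : List Int) (b : List Int) (out : List (List Int)) : Prop := out = order_code_intersection_alt a b
instance (a : List Int) (b : List Int) (out : List (List Int)) : Decidable (Spec_order_code_intersection a b out) := by unfold Spec_order_code_intersection; infer_instance

-- ===== CLAIM (what is proved, stated in full; the proofs are below) =====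
def Claim_equal_order_code_intersection : Prop := ∀ (a : List Int) (b : List Int), Dom_order_code_intersection a b → Spec_order_code_intersection a b (order_code_intersection a b)

-- ===== LEMMAS AND PROOFS =====

-- Python's max(l) on a nonempty list of ints, as A's port computes it
def pvMax (l : List Int) : Int := (PySem.List.max? l (fun x => x)).getD 0

-- the value-wise max image of A's dict of index lists
def pvToMax (d : PySem.Dict Int (List Int)) : PySem.Dict Int Int :=
  PySem.Dict.mk (d.items.map (fun p => (p.1, pvMax p.2)))

theorem pvMax_single (i : Int) : pvMax [i] = i := by
  simp [pvMax, PySem.List.max?_id_cons]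

theorem pvMax_append (l : List Int) (i : Int) (h : l ≠ []) :
    pvMax (l ++ [i]) = max (pvMax l) i := by
  cases l with
  | nil => exact absurd rfl h
  | cons x t => simp [pvMax, PySem.List.max?_id_cons, List.foldl_append]

theorem get?_pvToMax (d : PySem.Dict Int (List Int)) (k : Int) :
    (pvToMax d).get? k = (d.get? k).map pvMax := by
  simp [pvToMax, PySem.Dict.get?, List.find?_map]; rfl

theorem contains_pvToMax (d : PySem.Dict Int (List Int)) (k : Int) :
    (pvToMax d).contains k = d.contains k := by
  rw [PySem.Dict.contains_eq_isSome_get?, PySem.Dict.contains_eq_isSome_get?, get?_pvToMax]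
  cases d.get? k <;> rfl

theorem pvToMax_insert (d : PySem.Dict Int (List Int)) (k : Int) (v : List Int) :
    pvToMax (d.insert k v) = (pvToMax d).insert k (pvMax v) := by
  apply PySem.Dict.ext
  by_cases h : d.contains k = true
  · have h2 : (pvToMax d).contains k = true := by rw [contains_pvToMax]; exact h
    rw [show (pvToMax (d.insert k v)).items
          = (d.insert k v).items.map (fun p => (p.1, pvMax p.2)) from rfl,
        PySem.Dict.items_insert_of_contains _ _ h,
        PySem.Dict.items_insert_of_contains _ _ h2]
    rw [show (pvToMax d).items = d.items.map (fun p => (p.1, pvMax p.2)) from rfl]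
    rw [List.map_map, List.map_map]
    apply List.map_congr_left
    intro p _
    by_cases hk : p.1 = k <;> simp [hk]
  · have h2 : (pvToMax d).contains k = false := by rw [contains_pvToMax]; simpa using h
    rw [show (pvToMax (d.insert k v)).items
          = (d.insert k v).items.map (fun p => (p.1, pvMax p.2)) from rfl,
        PySem.Dict.items_insert_of_not_contains _ _ (by simpa using h),
        PySem.Dict.items_insert_of_not_contains _ _ h2]
    simp [pvToMax]

theorem ociCollect_eq_insert (d : PySem.Dict Int (List Int)) (k i : Int) :
    ociCollect d k i
      = d.insert k (match d.get? k with | none => [i] | some l => l ++ [i]) := by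
  cases h : d.get? k <;> simp [ociCollect, h]

theorem ociCollect_eq_modify (d : PySem.Dict Int (List Int)) (k i : Int) :
    ociCollect d k i = d.modify k [] (· ++ [i]) := by
  cases h : d.get? k <;>
    simp [ociCollect, h, PySem.Dict.modify, PySem.Dict.getD_eq_get?_getD]

-- one ociCollect step keeps every value list nonempty
theorem ociCollect_nonempty (d : PySem.Dict Int (List Int)) (k i : Int)
    (h : ∀ p ∈ d.items, p.2 ≠ []) :
    ∀ p ∈ (ociCollect d k i).items, p.2 ≠ [] := by
  intro p hp
  cases hg : d.get? k with
  | none =>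
    rw [ociCollect_eq_insert, hg] at hp
    rcases (PySem.Dict.mem_items_insert _ _ _ _).1 hp with h1 | h2
    · simp [h1]
    · exact h p h2.1
  | some l =>
    rw [ociCollect_eq_insert, hg] at hp
    rcases (PySem.Dict.mem_items_insert _ _ _ _).1 hp with h1 | h2
    · simp [h1]
    · exact h p h2.1

-- A's collecting loop keeps every value list nonempty
theorem ociFold_nonempty (ps : List (Int × Int)) (d : PySem.Dict Int (List Int))
    (h : ∀ p ∈ d.items, p.2 ≠ []) :
    ∀ p ∈ (ps.foldl (fun d p => ociCollect d p.2 p.1) d).items, p.2 ≠ [] := by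
  induction ps generalizing d with
  | nil => simpa using h
  | cons q t ih => exact ih _ (ociCollect_nonempty d q.2 q.1 h)

-- Phase 1: the max image of A's collecting fold IS B's running-max fold
theorem ociFold_toMax (ps : List (Int × Int)) (d : PySem.Dict Int (List Int))
    (h : ∀ p ∈ d.items, p.2 ≠ []) :
    pvToMax (ps.foldl (fun d p => ociCollect d p.2 p.1) d)
      = ps.foldl (fun d p => d.insert p.2 (max (d.getD p.2 p.1) p.1)) (pvToMax d) := by
  induction ps generalizing d with
  | nil => rfl
  | cons q t ih =>
    rw [List.foldl_cons, List.foldl_cons, ih _ (ociCollect_nonempty d q.2 q.1 h)]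
    congr 1
    cases hg : d.get? q.2 with
    | none =>
      rw [ociCollect_eq_insert, hg, pvToMax_insert, pvMax_single,
          PySem.Dict.getD_eq_get?_getD, get?_pvToMax, hg]
      simp
    | some l =>
      have hl : l ≠ [] := h (q.2, l) (PySem.Dict.mem_items_of_get?_eq_some d hg)
      rw [ociCollect_eq_insert, hg, pvToMax_insert, pvMax_append l q.1 hl,
          PySem.Dict.getD_eq_get?_getD, get?_pvToMax, hg]
      rfl

-- A's max-rebuilding loop over fresh distinct keys is exactly pvToMax
theorem ociRebuild_eq_toMax (d : PySem.Dict Int (List Int)) (h : d.keys.Nodup) :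
    d.items.foldl (fun d' p => d'.insert p.1 ((PySem.List.max? p.2 (fun x => x)).getD 0))
      PySem.Dict.empty = pvToMax d := by
  apply PySem.Dict.ext
  exact (PySem.Dict.items_foldl_insert_fresh d.items (fun p => p.1)
        (fun p => (PySem.List.max? p.2 (fun x => x)).getD 0) PySem.Dict.empty
        (fun a _ => PySem.Dict.contains_empty a.1) h).trans rfl

-- Phase 2: swap_key_value's keys are the distinct values of its input
theorem swap_keys (m : PySem.Dict Int Int) :
    (m.items.foldl (fun o p => ociCollect o p.2 p.1) PySem.Dict.empty).keys
      = PySem.Set.ofList m.values := by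
  simp only [ociCollect_eq_modify]
  exact (PySem.Dict.keys_foldl_modify_key m.items (fun p => p.2) []
        (fun (_ : PySem.Dict Int (List Int)) (p : Int × Int) (v : List Int) => v ++ [p.1]) PySem.Dict.empty).trans
    (by rw [PySem.Dict.keys_empty, PySem.Set.update_nil_left]; rfl)

-- Phase 2: swap_key_value's group for v is the filter of m's items at value v
theorem swap_getD (m : PySem.Dict Int Int) (v : Int) :
    (m.items.foldl (fun o p => ociCollect o p.2 p.1) PySem.Dict.empty).getD v []
      = (m.items.filter (fun p => p.2 == v)).map (fun p => p.1) := by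
  simp only [ociCollect_eq_modify]
  rw [show m.items.foldl (fun o p => o.modify p.2 [] (· ++ [p.1])) PySem.Dict.empty
        = (m.items.map (fun p => (p.2, p.1))).foldl
            (fun o q => o.modify q.1 [] (· ++ [q.2])) PySem.Dict.empty from
      (List.foldl_map (f := fun (p : Int × Int) => (p.2, p.1))
        (g := fun (o : PySem.Dict Int (List Int)) (q : Int × Int) =>
          o.modify q.1 [] (· ++ [q.2]))).symm]
  rw [PySem.Dict.getD_foldl_modify_append]
  rw [List.filter_map, List.map_map]
  simp [Function.comp_def]

-- ===== VERDICT (by name: the statement is the Claim_ definition above) =====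
theorem order_code_intersection_spec : Claim_equal_order_code_intersection := by
  intro a b _
  unfold Spec_order_code_intersection order_code_intersection order_code_intersection_alt
  dsimp only
  have hne : ∀ p ∈ (PySem.Dict.empty : PySem.Dict Int (List Int)).items, p.2 ≠ [] := by
    intro p hp; simp [PySem.Dict.empty] at hp
  have hne1 := ociFold_nonempty (PySem.List.enumerate a) PySem.Dict.empty hne
  have hnd : ((PySem.List.enumerate b).foldl (fun d p => ociCollect d p.2 p.1)
      ((PySem.List.enumerate a).foldl (fun d p => ociCollect d p.2 p.1)
        PySem.Dict.empty)).keys.Nodup := by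
    simp only [ociCollect_eq_modify]
    exact PySem.Dict.nodup_keys_foldl_modify_key _ (fun p => p.2) []
      (fun (_ : PySem.Dict Int (List Int)) (p : Int × Int) (v : List Int) => v ++ [p.1]) _
      (PySem.Dict.nodup_keys_foldl_modify_key _ (fun p => p.2) []
        (fun (_ : PySem.Dict Int (List Int)) (p : Int × Int) (v : List Int) => v ++ [p.1]) _
        (by rw [PySem.Dict.keys_empty]; exact List.nodup_nil))
  rw [ociRebuild_eq_toMax _ hnd,
      ociFold_toMax (PySem.List.enumerate b) _ hne1,
      ociFold_toMax (PySem.List.enumerate a) PySem.Dict.empty hne]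
  rw [show pvToMax (PySem.Dict.empty : PySem.Dict Int (List Int))
        = (PySem.Dict.empty : PySem.Dict Int Int) from rfl]
  congr 1
  rw [swap_keys]
  apply List.map_congr_left
  intro k _
  exact swap_getD _ k
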